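-- pv_equiv track=rewrite | github.com/mayursd/carescore-additional-features | src/services/soap_service.py | _parse_kv_lines
-- ===== SOURCE A (Python) =====
-- def _parse_kv_lines(block: str, expected_keys: list[str]) -> dict:
--     """
--     Parse lines like 'Key: value' into a dict. Only keep expected_keys (case-insensitive match).
--     """
--     out = {k: "" for k in expected_keys}
--     for line in block.splitlines():
--         if ":" not in line:
--             continue
--         k, v = line.split(":", 1)
--         key = k.strip()
--         val = v.strip()
--         # normalize key by underscores/slashes/spaces
--         key_norm = key.replace("/", "_").replace(" ", "_")
--         for ek in expected_keys:
--             if key_norm.lower() == ek.lower():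
--                 out[ek] = val
--                 break
--     return out
-- ===== SOURCE B (Python) =====
-- def _parse_kv_lines(block: str, expected_keys: list[str]) -> dict:
--     # One pass indexing all 'Key: value' lines by normalized lowercased key (last wins),
--     # then a separate extraction pass over expected_keys.
--     parsed = {}
--     for line in block.splitlines():
--         if ":" not in line:
--             continue
--         k, v = line.split(":", 1)
--         parsed[k.strip().replace("/", "_").replace(" ", "_").lower()] = v.strip()
--     return {ek: parsed.get(ek.lower(), "") for ek in expected_keys}
-- ===== Notes on version B (the rewrite author's own statement) =====
-- stated objective: alternative
-- what changed: Replaced the nested line-by-expected-key scan with break by a single indexing pass that stores every parsed line in a dict keyed by the normalized lowercased key, followed by a separate extraction pass over expected_keys via parsed.get(ek.lower(), '').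
-- outside the precondition, e.g. on _parse_kv_lines('a: 1', ['A', 'a']): A returns {'A': '1', 'a': ''}, B returns {'A': '1', 'a': '1'}
import Mathlib
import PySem

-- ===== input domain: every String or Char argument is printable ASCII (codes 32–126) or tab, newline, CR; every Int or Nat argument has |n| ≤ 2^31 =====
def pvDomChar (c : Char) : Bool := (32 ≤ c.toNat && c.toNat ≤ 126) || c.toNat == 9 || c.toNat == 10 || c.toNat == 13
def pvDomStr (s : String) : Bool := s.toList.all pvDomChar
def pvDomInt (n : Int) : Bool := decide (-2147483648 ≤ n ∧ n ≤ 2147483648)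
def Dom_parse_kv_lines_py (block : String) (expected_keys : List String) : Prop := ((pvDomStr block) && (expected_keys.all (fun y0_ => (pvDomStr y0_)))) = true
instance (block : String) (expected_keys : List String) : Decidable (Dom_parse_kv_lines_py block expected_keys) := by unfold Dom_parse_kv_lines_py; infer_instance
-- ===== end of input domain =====

-- B replaces A's nested line-by-expected-key scan (with break) by one indexing pass over the
-- lines plus a separate extraction pass over expected_keys (alternative decomposition).


-- ===== PORT A =====
-- body of A's 'for line in block.splitlines()' loop
def pvAStep (expected_keys : List String) (out : PySem.Dict String String) (line : String) : PySem.Dict String String :=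
  if PySem.Str.isIn ":" line then
    match PySem.Str.splitMax? line ":" 1 with
    | some (k :: v :: _) =>
        let key := PySem.Str.strip k
        let val := PySem.Str.strip v
        let key_norm := PySem.Str.replace (PySem.Str.replace key "/" "_") " " "_"
        -- inner 'for ek in expected_keys: … break' = first matching ek
        match expected_keys.find? (fun ek => PySem.Str.lower key_norm == PySem.Str.lower ek) with
        | some ek => out.insert ek val
        | none => out
    | _ => out   -- unreachable: split(":", 1) with ":" in line yields two parts
  else out

def parse_kv_lines_py (block : String) (expected_keys : List String) : List (String × String) :=
  let out0 := expected_keys.foldl (fun d k => d.insert k "") PySem.Dict.empty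
  ((PySem.Str.splitlines block).foldl (pvAStep expected_keys) out0).items

-- ===== PORT B =====
-- body of B's indexing loop over the lines
def pvBStep (p : PySem.Dict String String) (line : String) : PySem.Dict String String :=
  if PySem.Str.isIn ":" line then
    match PySem.Str.splitMax? line ":" 1 with
    | some (k :: v :: _) =>
        p.insert (PySem.Str.lower (PySem.Str.replace (PySem.Str.replace (PySem.Str.strip k) "/" "_") " " "_")) (PySem.Str.strip v)
    | _ => p   -- unreachable, as in A
  else p

def parse_kv_lines_py_alt (block : String) (expected_keys : List String) : List (String × String) :=
  let parsed := (PySem.Str.splitlines block).foldl pvBStep PySem.Dict.empty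
  (expected_keys.foldl (fun d ek => d.insert ek (parsed.getD (PySem.Str.lower ek) "")) PySem.Dict.empty).items

-- ===== PRECONDITION & SPEC =====
-- Pre_ excludes expected_keys lists containing two DISTINCT keys that are equal case-insensitively
-- (e.g. ["A","a"]): on those A's first-match-with-break fills only the first of them while B fills
-- both — a duplicate-key corner on which either behaviour is defensible.
def Pre_parse_kv_lines_py (block : String) (expected_keys : List String) : Prop :=
  ∀ a ∈ expected_keys, ∀ b ∈ expected_keys, PySem.Str.lower a = PySem.Str.lower b → a = b
instance (block : String) (expected_keys : List String) : Decidable (Pre_parse_kv_lines_py block expected_keys) := by unfold Pre_parse_kv_lines_py; infer_instance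

def pvWitness_parse_kv_lines_py : String × List String := ("Name: Bob\nA/B: x\nage :  7 ", ["Name", "Age", "A_B"])

def Spec_parse_kv_lines_py (block : String) (expected_keys : List String) (out : List (String × String)) : Prop := out = parse_kv_lines_py_alt block expected_keys
instance (block : String) (expected_keys : List String) (out : List (String × String)) : Decidable (Spec_parse_kv_lines_py block expected_keys out) := by unfold Spec_parse_kv_lines_py; infer_instance

-- ===== CLAIM (what is proved, stated in full; the proofs are below) =====
def Claim_equal_parse_kv_lines_py : Prop := ∀ (block : String) (expected_keys : List String), Dom_parse_kv_lines_py block expected_keys → Pre_parse_kv_lines_py block expected_keys → Spec_parse_kv_lines_py block expected_keys (parse_kv_lines_py block expected_keys)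

-- ===== LEMMAS AND PROOFS =====

-- inserting at an existing key leaves the key list unchanged
theorem pv_keys_insert_mem (d : PySem.Dict String String) (k v : String) (h : k ∈ d.keys) :
    (d.insert k v).keys = d.keys := by
  have h1 := PySem.Dict.keys_foldl_insert [k] (fun _ _ => v) d
  simp only [List.foldl_cons, List.foldl_nil] at h1
  rw [h1, PySem.Set.update_cons, PySem.Set.update_nil, PySem.Set.add_of_mem h]

-- getD after a fold inserting every list element with a value depending only on the element
theorem pv_getD_foldl_insert (l : List String) (f : String → String)
    (d : PySem.Dict String String) (k dflt : String) :
    (l.foldl (fun d x => d.insert x (f x)) d).getD k dflt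
      = if k ∈ l then f k else d.getD k dflt := by
  induction l generalizing d with
  | nil => simp
  | cons a l ih =>
    simp only [List.foldl_cons, ih, List.mem_cons]
    rw [PySem.Dict.getD_insert]
    by_cases hl : k ∈ l
    · simp [hl]
    · by_cases ha : k = a <;> simp [hl, ha]

-- one line: A's out-dict keeps its keys, and its entries keep tracking B's parsed-dict
theorem pv_step (expected : List String)
    (hpre : ∀ a ∈ expected, ∀ b ∈ expected, PySem.Str.lower a = PySem.Str.lower b → a = b)
    (line : String) (out p : PySem.Dict String String)
    (hcont : ∀ ek ∈ expected, ek ∈ out.keys)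
    (hlink : ∀ ek ∈ expected, out.getD ek "" = p.getD (PySem.Str.lower ek) "") :
    (pvAStep expected out line).keys = out.keys ∧
    (∀ ek ∈ expected, (pvAStep expected out line).getD ek ""
        = (pvBStep p line).getD (PySem.Str.lower ek) "") := by
  unfold pvAStep pvBStep
  by_cases hc : PySem.Str.isIn ":" line
  · simp only [hc, if_pos]
    cases hs : PySem.Str.splitMax? line ":" 1 with
    | none => exact ⟨rfl, hlink⟩
    | some parts =>
      match parts with
      | [] => exact ⟨rfl, hlink⟩
      | [k] => exact ⟨rfl, hlink⟩
      | k :: v :: rest =>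
        simp only
        set key_norm := PySem.Str.replace (PySem.Str.replace (PySem.Str.strip k) "/" "_") " " "_" with hkn
        cases hf : expected.find? (fun ek => PySem.Str.lower key_norm == PySem.Str.lower ek) with
        | none =>
          refine ⟨rfl, fun ek hek => ?_⟩
          have hne : PySem.Str.lower ek ≠ PySem.Str.lower key_norm := by
            intro h
            exact (List.find?_eq_none.mp hf ek hek) (by simp [h.symm])
          rw [PySem.Dict.getD_insert_of_ne _ _ _ hne, hlink ek hek]
        | some ek0 =>
          have hek0 : ek0 ∈ expected := List.mem_of_find?_eq_some hf
          have heq : PySem.Str.lower key_norm = PySem.Str.lower ek0 := by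
            have := List.find?_some hf; simpa using this
          refine ⟨pv_keys_insert_mem out ek0 _ (hcont ek0 hek0), fun ek hek => ?_⟩
          by_cases he : ek = ek0
          · subst he
            rw [PySem.Dict.getD_insert_self, ← heq, PySem.Dict.getD_insert_self]
          · have hne : PySem.Str.lower ek ≠ PySem.Str.lower key_norm := by
              intro h
              exact he (hpre ek hek ek0 hek0 (h.trans heq))
            rw [PySem.Dict.getD_insert_of_ne _ _ _ he,
                PySem.Dict.getD_insert_of_ne _ _ _ hne, hlink ek hek]
  · rw [if_neg hc, if_neg hc]
    exact ⟨rfl, hlink⟩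

-- main loop invariant over all lines
theorem pv_main (expected : List String)
    (hpre : ∀ a ∈ expected, ∀ b ∈ expected, PySem.Str.lower a = PySem.Str.lower b → a = b)
    (lines : List String) (out p : PySem.Dict String String)
    (hcont : ∀ ek ∈ expected, ek ∈ out.keys)
    (hlink : ∀ ek ∈ expected, out.getD ek "" = p.getD (PySem.Str.lower ek) "") :
    (lines.foldl (pvAStep expected) out).keys = out.keys ∧
    (∀ ek ∈ expected, (lines.foldl (pvAStep expected) out).getD ek ""
        = (lines.foldl pvBStep p).getD (PySem.Str.lower ek) "") := by
  induction lines generalizing out p with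
  | nil => exact ⟨rfl, hlink⟩
  | cons line lines ih =>
    obtain ⟨hk, hl⟩ := pv_step expected hpre line out p hcont hlink
    have hcont' : ∀ ek ∈ expected, ek ∈ (pvAStep expected out line).keys := by
      intro ek hek; rw [hk]; exact hcont ek hek
    obtain ⟨hk2, hl2⟩ := ih (pvAStep expected out line) (pvBStep p line) hcont' hl
    exact ⟨by rw [List.foldl_cons] at *; rw [hk2, hk], by simpa using hl2⟩

theorem pv_final (block : String) (expected_keys : List String)
    (hpre : ∀ a ∈ expected_keys, ∀ b ∈ expected_keys, PySem.Str.lower a = PySem.Str.lower b → a = b) :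
    parse_kv_lines_py block expected_keys = parse_kv_lines_py_alt block expected_keys := by
  unfold parse_kv_lines_py parse_kv_lines_py_alt
  simp only
  set lines := PySem.Str.splitlines block with hlines
  set parsed := lines.foldl pvBStep PySem.Dict.empty with hparsed
  set out0 := expected_keys.foldl (fun d k => d.insert k "") PySem.Dict.empty with hout0
  set dA := lines.foldl (pvAStep expected_keys) out0 with hdA
  set dB := expected_keys.foldl (fun d ek => d.insert ek (parsed.getD (PySem.Str.lower ek) "")) PySem.Dict.empty with hdB
  have hk0 : out0.keys = PySem.Set.update PySem.Dict.empty.keys expected_keys :=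
    PySem.Dict.keys_foldl_insert expected_keys (fun _ _ => "") PySem.Dict.empty
  have hkB : dB.keys = PySem.Set.update PySem.Dict.empty.keys expected_keys :=
    PySem.Dict.keys_foldl_insert expected_keys (fun _ ek => parsed.getD (PySem.Str.lower ek) "") PySem.Dict.empty
  have hmem0 : ∀ ek ∈ expected_keys, ek ∈ out0.keys := by
    intro ek hek
    rw [hk0]
    exact (PySem.Set.mem_update _ _ _).mpr (Or.inr hek)
  have hlink0 : ∀ ek ∈ expected_keys, out0.getD ek "" = PySem.Dict.empty.getD (PySem.Str.lower ek) "" := by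
    intro ek hek
    rw [hout0, pv_getD_foldl_insert expected_keys (fun _ => "") PySem.Dict.empty ek ""]
    simp [hek, PySem.Dict.getD_empty]
  obtain ⟨hkA, hlA⟩ := pv_main expected_keys hpre lines out0 PySem.Dict.empty hmem0 hlink0
  have hnd0 : out0.keys.Nodup := by
    rw [hout0]
    exact PySem.Dict.nodup_keys_foldl_insert expected_keys (fun _ _ => "") PySem.Dict.empty (by simp)
  have hndA : dA.keys.Nodup := by rw [hkA]; exact hnd0
  have hndB : dB.keys.Nodup := by
    rw [hdB]
    exact PySem.Dict.nodup_keys_foldl_insert expected_keys _ PySem.Dict.empty (by simp)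
  rw [PySem.Dict.items_eq_map_keys dA hndA "", PySem.Dict.items_eq_map_keys dB hndB "",
      hkA, hk0, ← hkB]
  apply List.map_congr_left
  intro k hkmem
  have hkexp : k ∈ expected_keys := by
    rw [hkB] at hkmem
    rcases (PySem.Set.mem_update _ _ _).mp hkmem with h | h
    · simp [PySem.Dict.keys_empty] at h
    · exact h
  have h1 : dA.getD k "" = parsed.getD (PySem.Str.lower k) "" := hlA k hkexp
  have h2 : dB.getD k "" = parsed.getD (PySem.Str.lower k) "" := by
    rw [hdB, pv_getD_foldl_insert expected_keys (fun ek => parsed.getD (PySem.Str.lower ek) "") PySem.Dict.empty k ""]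
    simp [hkexp]
  rw [h1, h2]

-- ===== VERDICT (by name: the statement is the Claim_ definition above) =====
theorem parse_kv_lines_py_spec : Claim_equal_parse_kv_lines_py := by
  intro block expected_keys _ hpre
  unfold Spec_parse_kv_lines_py
  exact pv_final block expected_keys hpre
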